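-- pv_equiv track=rewrite | github.com/Pmasters73/WPS_REPORTS | main.py | group_paused_rows_by_work_date
-- ===== SOURCE A (Python) =====
-- def group_paused_rows_by_work_date(rows):
--     grouped_rows = []
--     current_label = None
--     current_rows = []
--
--     for row in rows:
--         work_date = row.get("WorkDate")
--         if work_date in (None, ""):
--             work_date_label = "Unknown"
--         else:
--             work_date_label = str(work_date)
--
--         if work_date_label != current_label:
--             if current_rows:
--                 grouped_rows.append((current_label, current_rows))
--             current_label = work_date_label
--             current_rows = []
--
--         current_rows.append(row)
--
--     if current_rows:
--         grouped_rows.append((current_label, current_rows))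
--
--     return grouped_rows
-- ===== SOURCE B (Python) =====
-- def _work_date_label(row):
--     work_date = row.get("WorkDate")
--     if work_date in (None, ""):
--         return "Unknown"
--     return str(work_date)
--
--
-- def group_paused_rows_by_work_date(rows):
--     labels = [_work_date_label(row) for row in rows]
--     n = len(rows)
--     starts = [i for i in range(n) if i == 0 or labels[i] != labels[i - 1]]
--     bounds = starts + [n]
--     return [(labels[s], rows[s:e]) for s, e in zip(starts, bounds[1:])]
-- ===== Notes on version B (the rewrite author's own statement) =====
-- stated objective: alternative
-- what changed: Replaces the stateful current_label/current_rows run-accumulation loop (with end-of-loop flush) by three staged passes: map every row to its label, compute the group-start indices by comparing each label with its predecessor, then emit one (label, slice) per adjacent pair of boundary indices.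
import Mathlib
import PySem

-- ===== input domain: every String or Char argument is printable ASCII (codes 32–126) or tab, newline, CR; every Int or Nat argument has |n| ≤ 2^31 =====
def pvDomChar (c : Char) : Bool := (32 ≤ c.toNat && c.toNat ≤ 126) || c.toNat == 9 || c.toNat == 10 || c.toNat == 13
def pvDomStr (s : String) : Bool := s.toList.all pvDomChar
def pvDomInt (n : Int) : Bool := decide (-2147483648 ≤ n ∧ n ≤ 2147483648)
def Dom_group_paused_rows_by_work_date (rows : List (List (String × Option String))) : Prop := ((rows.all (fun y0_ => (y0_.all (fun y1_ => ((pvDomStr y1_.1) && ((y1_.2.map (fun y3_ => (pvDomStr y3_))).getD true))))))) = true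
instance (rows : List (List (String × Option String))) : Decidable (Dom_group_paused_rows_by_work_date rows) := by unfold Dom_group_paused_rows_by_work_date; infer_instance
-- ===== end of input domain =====

-- B replaces A's stateful run-accumulation loop by three staged passes (labels, group-start
-- indices from predecessor comparison, slices per adjacent boundary pair); same return value, no speed claim.


-- ===== PORT A =====
-- A's manual boundary-tracking loop, as structural recursion over the rows with
-- state (grouped_rows, current_label, current_rows); the final flush follows the loop.
def pvLabelOfGet (wd : Option (Option String)) : String :=
  match wd with
  | none => "Unknown"
  | some none => "Unknown"
  | some (some s) => if s = "" then "Unknown" else s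

def pvLoopA (grouped : List (String × List (List (String × Option String))))
    (label : Option String) (cur : List (List (String × Option String)))
    (rows : List (List (String × Option String))) :
    List (String × List (List (String × Option String))) × Option String ×
      List (List (String × Option String)) :=
  match rows with
  | [] => (grouped, label, cur)
  | row :: rest =>
    let workDateLabel := pvLabelOfGet (List.lookup "WorkDate" row)
    if some workDateLabel ≠ label then
      pvLoopA (grouped ++ (if cur ≠ [] then [(label.getD "", cur)] else []))
        (some workDateLabel) [row] rest
    else
      pvLoopA grouped label (cur ++ [row]) rest

def group_paused_rows_by_work_date (rows : List (List (String × Option String))) : List (String × (List (List (String × Option String)))) :=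
  let st := pvLoopA [] none [] rows
  if st.2.2 ≠ [] then st.1 ++ [(st.2.1.getD "", st.2.2)] else st.1

-- ===== PORT B =====
-- B: staged passes — map every row to its label (helper _work_date_label), collect the
-- group-start indices by comparing each label with its predecessor, append the end bound,
-- then emit one (label, slice) per adjacent pair of boundaries.
def pvKeyB (row : List (String × Option String)) : String :=
  match List.lookup "WorkDate" row with
  | none => "Unknown"
  | some none => "Unknown"
  | some (some s) => if s = "" then "Unknown" else s

-- the comprehension '[i for i in range(n) if i == 0 or labels[i] != labels[i-1]]':
-- indices are Nat (range(n) yields 0..n-1 ≥ 0); Python's short-circuit 'or' guards i == 0, and at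
-- i = 0 Nat's 0-1 = 0 keeps the disjunct harmless, so the filter is exact; labels[i] is in range,
-- so getD with default "" is exact.
def pvStarts (ls : List String) : List Nat :=
  (List.range ls.length).filter (fun i => i == 0 || ls.getD i "" != ls.getD (i - 1) "")

-- '[(labels[s], rows[s:e]) for s, e in zip(starts, bounds[1:])]': 0 ≤ s ≤ e ≤ len(rows)
-- for every produced pair, so the slice rows[s:e] is exactly (rows.drop s).take (e - s).
def pvChunks (rows : List (List (String × Option String))) (labels : List String)
    (starts : List Nat) (n : Nat) : List (String × List (List (String × Option String))) :=
  (starts.zip ((starts ++ [n]).tail)).map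
    (fun p => (labels.getD p.1 "", (rows.drop p.1).take (p.2 - p.1)))

def group_paused_rows_by_work_date_alt (rows : List (List (String × Option String))) : List (String × (List (List (String × Option String)))) :=
  let labels := rows.map pvKeyB
  let n := rows.length
  let starts := pvStarts labels
  pvChunks rows labels starts n

-- ===== PRECONDITION & SPEC =====
def Spec_group_paused_rows_by_work_date (rows : List (List (String × Option String))) (out : List (String × (List (List (String × Option String))))) : Prop := out = group_paused_rows_by_work_date_alt rows
instance (rows : List (List (String × Option String))) (out : List (String × (List (List (String × Option String))))) : Decidable (Spec_group_paused_rows_by_work_date rows out) := by unfold Spec_group_paused_rows_by_work_date; infer_instance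

-- ===== CLAIM (what is proved, stated in full; the proofs are below) =====
def Claim_equal_group_paused_rows_by_work_date : Prop := ∀ (rows : List (List (String × Option String))), Dom_group_paused_rows_by_work_date rows → Spec_group_paused_rows_by_work_date rows (group_paused_rows_by_work_date rows)

-- ===== LEMMAS AND PROOFS =====
-- Proof-side middle man: the consecutive-run (span) grouping; both ports are proved equal to it.
def pvGroupBy (rows : List (List (String × Option String))) :
    List (String × List (List (String × Option String))) :=
  match rows with
  | [] => []
  | r :: rs =>
    let k := pvKeyB r
    let p := rs.span (fun x => pvKeyB x = k)
    (k, r :: p.1) :: pvGroupBy p.2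
termination_by rows.length
decreasing_by
  simp only [List.span_eq_takeWhile_dropWhile, List.length_cons]
  exact Nat.lt_succ_of_le (List.length_dropWhile_le _ _)

def pvFlush (st : List (String × List (List (String × Option String))) × Option String ×
    List (List (String × Option String))) : List (String × List (List (String × Option String))) :=
  if st.2.2 ≠ [] then st.1 ++ [(st.2.1.getD "", st.2.2)] else st.1

theorem pvLoopA_cons (grouped : List (String × List (List (String × Option String))))
    (label : Option String) (cur : List (List (String × Option String)))
    (r : List (String × Option String)) (rest : List (List (String × Option String))) :
    pvLoopA grouped label cur (r :: rest) =
      if some (pvKeyB r) ≠ label then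
        pvLoopA (grouped ++ (if cur ≠ [] then [(label.getD "", cur)] else []))
          (some (pvKeyB r)) [r] rest
      else pvLoopA grouped label (cur ++ [r]) rest := rfl

theorem pvGroupBy_cons (r : List (String × Option String))
    (rs : List (List (String × Option String))) :
    pvGroupBy (r :: rs) =
      (pvKeyB r, r :: rs.takeWhile (fun x => pvKeyB x = pvKeyB r)) ::
        pvGroupBy (rs.dropWhile (fun x => pvKeyB x = pvKeyB r)) := by
  rw [pvGroupBy.eq_def]
  simp [List.span_eq_takeWhile_dropWhile]

theorem pvGroupBy_nil : pvGroupBy [] = [] := by rw [pvGroupBy.eq_def]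

theorem pvLoopA_inv (rows : List (List (String × Option String)))
    (grouped : List (String × List (List (String × Option String))))
    (l : String) (cur : List (List (String × Option String))) (hcur : cur ≠ []) :
    pvFlush (pvLoopA grouped (some l) cur rows) =
    grouped ++ (l, cur ++ rows.takeWhile (fun r => pvKeyB r = l)) ::
      pvGroupBy (rows.dropWhile (fun r => pvKeyB r = l)) := by
  induction rows generalizing grouped l cur with
  | nil => simp [pvLoopA, pvFlush, hcur, pvGroupBy_nil]
  | cons r rs ih =>
    by_cases hk : pvKeyB r = l
    · have hstep : pvLoopA grouped (some l) cur (r :: rs) =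
          pvLoopA grouped (some l) (cur ++ [r]) rs := by
        rw [pvLoopA_cons]; simp [hk]
      rw [hstep, ih _ _ _ (by simp)]
      simp [hk]
    · have hstep : pvLoopA grouped (some l) cur (r :: rs) =
          pvLoopA (grouped ++ [(l, cur)]) (some (pvKeyB r)) [r] rs := by
        rw [pvLoopA_cons]; simp [hk, hcur]
      rw [hstep, ih _ _ _ (by simp), List.takeWhile_cons_of_neg (by simp [hk]),
        List.dropWhile_cons_of_neg (by simp [hk]), pvGroupBy_cons]
      simp

theorem portA_eq_groupBy (rows : List (List (String × Option String))) :
    group_paused_rows_by_work_date rows = pvGroupBy rows := by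
  unfold group_paused_rows_by_work_date
  match rows with
  | [] => simp [pvLoopA, pvGroupBy_nil]
  | r :: rs =>
    show pvFlush (pvLoopA [] none [] (r :: rs)) = pvGroupBy (r :: rs)
    have h1 : pvLoopA [] none [] (r :: rs) = pvLoopA [] (some (pvKeyB r)) [r] rs := by
      rw [pvLoopA_cons]; simp
    rw [h1, pvLoopA_inv _ _ _ _ (by simp), pvGroupBy_cons]
    simp

-- ---- B-side: pvStarts via a "previous value" recursion ----
def pvS (p : String) : List String → List Nat
  | [] => []
  | x :: xs => (if x ≠ p then [0] else []) ++ (pvS x xs).map (· + 1)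

theorem pvS_filter (ls : List String) (p : String) :
    (List.range ls.length).filter (fun i => ls.getD i "" != (p :: ls).getD i "") = pvS p ls := by
  induction ls generalizing p with
  | nil => simp [pvS]
  | cons x xs ih =>
    rw [List.length_cons, List.range_succ_eq_map, List.filter_cons, List.filter_map]
    have hpred : (fun i => (x :: xs).getD i "" != (p :: x :: xs).getD i "") ∘ Nat.succ =
        (fun i => xs.getD i "" != (x :: xs).getD i "") := by
      funext i; rfl
    rw [hpred, ih x]
    by_cases hx : x = p
    · simp [pvS, hx]
    · simp [pvS, hx, bne_iff_ne]

theorem pvStarts_cons (h : String) (tl : List String) :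
    pvStarts (h :: tl) = 0 :: (pvS h tl).map (· + 1) := by
  unfold pvStarts
  rw [List.length_cons, List.range_succ_eq_map, List.filter_cons, List.filter_map]
  have hpred : (fun i => (i == 0) || (h :: tl).getD i "" != (h :: tl).getD (i - 1) "") ∘ Nat.succ =
      (fun i => tl.getD i "" != (h :: tl).getD i "") := by
    funext i; simp
  rw [hpred, pvS_filter]
  simp

theorem pvS_replicate (k : String) (m : Nat) (ls : List String) :
    pvS k (List.replicate m k ++ ls) = (pvS k ls).map (· + m) := by
  induction m with
  | zero => simp
  | succ m ih =>
    rw [List.replicate_succ, List.cons_append]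
    have h1 : pvS k (k :: (List.replicate m k ++ ls)) =
        (pvS k (List.replicate m k ++ ls)).map (· + 1) := by simp [pvS]
    rw [h1, ih, List.map_map]
    apply List.map_congr_left
    intro a _
    simp only [Function.comp_apply]
    omega

theorem pvS_eq_pvStarts (k : String) (ls : List String)
    (hne : ls = [] ∨ ls.getD 0 "" ≠ k) : pvS k ls = pvStarts ls := by
  match ls with
  | [] => simp [pvS, pvStarts]
  | h :: tl =>
    have hk : h ≠ k := by
      rcases hne with h' | h'
      · exact absurd h' (by simp)
      · simpa using h'
    rw [pvStarts_cons, pvS]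
    simp [hk]

theorem zip_cons_bounds (a : Nat) (ss : List Nat) (n : Nat) :
    List.zip (a :: ss) (ss ++ [n]) = (a, ss.headD n) :: List.zip ss (ss.tail ++ [n]) := by
  match ss with
  | [] => rfl
  | m :: w => rfl

theorem pvChunks_shift (d : List (List (String × Option String))) (pre : List (List (String × Option String)))
    (labels : List String) (hlen : labels.length = pre.length)
    (starts : List Nat) (n : Nat) :
    pvChunks (pre ++ d) (labels ++ d.map pvKeyB) (starts.map (· + pre.length)) (n + pre.length) =
      pvChunks d (d.map pvKeyB) starts n := by
  unfold pvChunks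
  have hb : (starts.map (· + pre.length) ++ [n + pre.length]) =
      (starts ++ [n]).map (· + pre.length) := by simp
  rw [hb]
  have ht : ((starts ++ [n]).map (· + pre.length)).tail = ((starts ++ [n]).tail).map (· + pre.length) := by
    match starts with
    | [] => simp
    | s :: w => simp
  rw [ht, List.zip_map, List.map_map]
  apply List.map_congr_left
  intro p _
  simp only [Function.comp, Prod.map]
  congr 1
  · rw [← hlen]
    simp [List.getD_eq_getElem?_getD,
      List.getElem?_append_right (show labels.length ≤ p.1 + labels.length by omega)]
  · have hc : p.2 + pre.length - (p.1 + pre.length) = p.2 - p.1 := by omega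
    rw [List.drop_append, hc, List.drop_eq_nil_of_le (by omega), Nat.add_sub_cancel,
      List.nil_append]

theorem key_head_dropWhile (k : String) (rs : List (List (String × Option String)))
    (x : List (String × Option String)) (xs : List (List (String × Option String)))
    (h : rs.dropWhile (fun y => pvKeyB y = k) = x :: xs) : pvKeyB x ≠ k := by
  have hw : rs.dropWhile (fun y => decide (pvKeyB y = k)) ≠ [] := by simp [h]
  have h2 := List.head_dropWhile_not (fun y => decide (pvKeyB y = k)) hw
  have h3 : (rs.dropWhile (fun y => decide (pvKeyB y = k))).head hw = x := by simp [h]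
  rw [h3] at h2
  simpa using h2

theorem zip_tail_bounds (ss : List Nat) (n : Nat) :
    List.zip ss (ss.tail ++ [n]) = List.zip ss ((ss ++ [n]).tail) := by
  cases ss <;> rfl

theorem portB_aux (N : Nat) (rows : List (List (String × Option String)))
    (hlen : rows.length ≤ N) :
    group_paused_rows_by_work_date_alt rows = pvGroupBy rows := by
  induction N generalizing rows with
  | zero =>
    have h0 : rows = [] := List.eq_nil_of_length_eq_zero (Nat.le_zero.mp hlen)
    subst h0
    rw [pvGroupBy_nil]
    rfl
  | succ N ih =>
    match rows with
    | [] => rw [pvGroupBy_nil]; rfl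
    | r :: rs =>
      -- abbreviations
      let k := pvKeyB r
      let t := rs.takeWhile (fun x => pvKeyB x = k)
      let d := rs.dropWhile (fun x => pvKeyB x = k)
      have hsplit : rs = t ++ d := (List.takeWhile_append_dropWhile).symm
      have hrows : r :: rs = (r :: t) ++ d := by rw [List.cons_append, hsplit]
      have hmapt : t.map pvKeyB = List.replicate t.length k := by
        rw [List.eq_replicate_iff]
        refine ⟨by simp, ?_⟩
        intro b hb
        simp only [List.mem_map] at hb
        obtain ⟨x, hx, rfl⟩ := hb
        simpa using List.mem_takeWhile_imp hx
      have hlabels : (r :: rs).map pvKeyB =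
          List.replicate (t.length + 1) k ++ d.map pvKeyB := by
        rw [List.replicate_succ, List.cons_append, List.map_cons]
        show (k :: rs.map pvKeyB) = _
        rw [hsplit, List.map_append, hmapt]
      have hne : d.map pvKeyB = [] ∨ (d.map pvKeyB).getD 0 "" ≠ k := by
        rcases hd : d with _ | ⟨x, xs⟩
        · exact Or.inl rfl
        · right
          have hx := key_head_dropWhile k rs x xs hd
          simp [hx]
      have hstarts : pvStarts ((r :: rs).map pvKeyB) =
          0 :: (pvStarts (d.map pvKeyB)).map (· + (t.length + 1)) := by
        rw [hlabels, List.replicate_succ, List.cons_append, pvStarts_cons,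
          pvS_replicate, pvS_eq_pvStarts _ _ hne, List.map_map]
        rfl
      have hdn : d.length ≤ rs.length := List.length_dropWhile_le _ _
      have hn : (r :: rs).length = d.length + (r :: t).length := by
        rw [hrows, List.length_append]
        omega
      have hm : (r :: t).length = t.length + 1 := by simp
      -- the shifted starts
      have hS'head : ((pvStarts (d.map pvKeyB)).map (· + (t.length + 1))).headD
          ((r :: rs).length) = t.length + 1 := by
        rcases hd : d with _ | ⟨x, xs⟩
        · have : rs.length = t.length := by rw [hsplit, hd]; simp
          simp [pvStarts, this]
        · rw [List.map_cons, pvStarts_cons]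
          simp
      -- unfold B
      show pvChunks (r :: rs) ((r :: rs).map pvKeyB) (pvStarts ((r :: rs).map pvKeyB))
          ((r :: rs).length) = pvGroupBy (r :: rs)
      rw [hstarts]
      unfold pvChunks
      rw [List.cons_append, List.tail_cons, zip_cons_bounds, List.map_cons, hS'head]
      have hhead : ((r :: rs).map pvKeyB).getD 0 "" = k := rfl
      have htake : ((r :: rs).drop 0).take (t.length + 1 - 0) = r :: t := by
        rw [List.drop_zero, Nat.sub_zero, hrows, ← hm, List.take_left]
      rw [hhead, htake]
      -- the tail is the shifted chunks of d
      have htail :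
          ((((pvStarts (d.map pvKeyB)).map (· + (t.length + 1))).zip
              ((((pvStarts (d.map pvKeyB)).map (· + (t.length + 1))).tail) ++
                [(r :: rs).length])).map
            (fun p => (((r :: rs).map pvKeyB).getD p.1 "",
              ((r :: rs).drop p.1).take (p.2 - p.1)))) =
          pvChunks d (d.map pvKeyB) (pvStarts (d.map pvKeyB)) d.length := by
        rw [zip_tail_bounds]
        have heq : ((((pvStarts (d.map pvKeyB)).map (· + (t.length + 1))).zip
              (((pvStarts (d.map pvKeyB)).map (· + (t.length + 1)) ++
                [(r :: rs).length]).tail)).map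
            (fun p => (((r :: rs).map pvKeyB).getD p.1 "",
              ((r :: rs).drop p.1).take (p.2 - p.1)))) =
            pvChunks (r :: rs) ((r :: rs).map pvKeyB)
              ((pvStarts (d.map pvKeyB)).map (· + (t.length + 1))) ((r :: rs).length) := rfl
        rw [heq]
        have hshift := pvChunks_shift d (r :: t) (List.replicate (t.length + 1) k)
          (by simp) (pvStarts (d.map pvKeyB)) d.length
        rw [hm] at hshift
        rw [hlabels, hn, hm, hrows]
        exact hshift
      rw [htail]
      have hd_alt : pvChunks d (d.map pvKeyB) (pvStarts (d.map pvKeyB)) d.length =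
          group_paused_rows_by_work_date_alt d := rfl
      rw [hd_alt, ih d (by simp at hlen; omega), pvGroupBy_cons]

theorem portB_eq_groupBy (rows : List (List (String × Option String))) :
    group_paused_rows_by_work_date_alt rows = pvGroupBy rows :=
  portB_aux rows.length rows (Nat.le_refl _)

-- ===== VERDICT (by name: the statement is the Claim_ definition above) =====
theorem group_paused_rows_by_work_date_spec : Claim_equal_group_paused_rows_by_work_date := by
  intro rows _
  unfold Spec_group_paused_rows_by_work_date
  rw [portA_eq_groupBy, portB_eq_groupBy]
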